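-- pv_equiv track=rewrite | github.com/Flint92/leetcode-exercise | python/excercise318/maximum_product_of_word_lengths.py | maximum_product_of_word_lengths
-- ===== SOURCE A (Python) =====
-- from typing import List
--
-- def maximum_product_of_word_lengths(words: List[str]) -> int:
--     n = len(words)
--     bits = [0] * n
--
--     ans = 0
--     for i in range(n):
--         for ch in words[i]:
--             bits[i] |= 1 << (ord(ch) - ord('a'))
--         for j in range(0, i):
--             if bits[i] & bits[j] == 0:
--                 prod = len(words[i]) * len(words[j])
--                 ans = max(ans, prod)
--     return ans
-- ===== SOURCE B (Python) =====
-- from typing import List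
--
-- def maximum_product_of_word_lengths(words: List[str]) -> int:
--     pairs = []
--     for w in words:
--         m = 0
--         for ch in w:
--             m |= 1 << (ord(ch) - ord('a'))
--         pairs.append((m, len(w)))
--     pairs.sort(key=lambda p: p[1], reverse=True)
--     ans = 0
--     for i, (m, l) in enumerate(pairs):
--         if l * l <= ans:
--             break
--         for m2, l2 in pairs[i + 1:]:
--             if l * l2 <= ans:
--                 break
--             if m & m2 == 0:
--                 ans = l * l2
--                 break
--     return ans
-- ===== Notes on version B (the rewrite author's own statement) =====
-- stated objective: faster
-- what changed: A scans every index pair with a preallocated bit-mask array; B builds (mask, length) pairs, sorts them by length descending, and scans greedily with early termination: per word the first disjoint partner is its best, and both loops break as soon as no remaining product can beat the current answer.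
import Mathlib
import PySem

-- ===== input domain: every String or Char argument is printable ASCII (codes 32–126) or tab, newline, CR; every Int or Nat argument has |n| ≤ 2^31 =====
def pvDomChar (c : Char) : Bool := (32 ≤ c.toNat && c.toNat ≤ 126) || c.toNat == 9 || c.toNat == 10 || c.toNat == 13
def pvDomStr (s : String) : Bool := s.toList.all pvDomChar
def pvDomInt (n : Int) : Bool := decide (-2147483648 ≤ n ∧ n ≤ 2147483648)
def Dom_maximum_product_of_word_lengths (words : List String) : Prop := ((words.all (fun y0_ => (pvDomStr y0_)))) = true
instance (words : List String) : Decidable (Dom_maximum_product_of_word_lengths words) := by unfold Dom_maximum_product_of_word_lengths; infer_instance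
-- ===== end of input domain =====

-- B sorts the (mask, length) pairs by length descending and scans greedily with early
-- termination (first disjoint partner is the best one; both loops break once no remaining
-- product can beat the answer), instead of A's full scan over all index pairs.

-- ===== PORT A =====
-- Literal port of A: bits array preallocated, outer index loop, char loop OR-ing 1 << (ord(ch)-97)
-- (exact under Pre_, which requires every character ≥ 'a'; below 'a' Python raises ValueError on
-- the negative shift), inner j-loop over the earlier indices.
def maximum_product_of_word_lengths (words : List String) : Int :=
  let n : Int := (words.length : Int)
  let bits0 : List Int := List.replicate words.length (0 : Int)
  let st := (PySem.List.pyRange 0 n 1).foldl (fun (st : Int × List Int) i =>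
      let bi := (PySem.List.pyGetD words i "").toList.foldl
          (fun b c => PySem.Int.bor b ((1 : Int) <<< ((c.toNat : Int) - 97)))
          (PySem.List.pyGetD st.2 i 0)
      let bits := PySem.List.pySetD st.2 i bi
      let ans := (PySem.List.pyRange 0 i 1).foldl (fun a j =>
          if PySem.Int.band bi (PySem.List.pyGetD bits j 0) = 0 then
            max a (PySem.Str.len (PySem.List.pyGetD words i "") *
                   PySem.Str.len (PySem.List.pyGetD words j ""))
          else a) st.1
      (ans, bits)) ((0 : Int), bits0)
  st.1

-- ===== PORT B =====
-- Port of B (Source B).  The inner for-loop with its two breaks becomes innerB (returns as soon as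
-- the remaining products cannot beat ans, or at the first disjoint partner), the outer loop
-- with its break becomes outerB; the pair list is built by appending and then sorted by length
-- descending exactly as pairs.sort(key=lambda p: p[1], reverse=True).
def innerB (m l : Int) : List (Int × Int) → Int → Int
  | [], ans => ans
  | x :: rest, ans =>
      if l * x.2 ≤ ans then ans
      else if PySem.Int.band m x.1 = 0 then l * x.2
      else innerB m l rest ans

def outerB : List (Int × Int) → Int → Int
  | [], ans => ans
  | x :: rest, ans =>
      if x.2 * x.2 ≤ ans then ans
      else outerB rest (innerB x.1 x.2 rest ans)

def maximum_product_of_word_lengths_alt (words : List String) : Int :=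
  let pairs := words.foldl (fun (acc : List (Int × Int)) w =>
      acc ++ [(w.toList.foldl (fun m c => PySem.Int.bor m ((1 : Int) <<< ((c.toNat : Int) - 97))) 0,
               PySem.Str.len w)]) []
  let sortedPairs := PySem.List.sorted pairs (fun p => p.2) true
  outerB sortedPairs 0

-- ===== PRECONDITION & SPEC =====
-- Pre_ excludes exactly the inputs where some word contains a character below 'a' (code < 97):
-- there Python A raises ValueError ('negative shift count'), and Python B raises identically.
def Pre_maximum_product_of_word_lengths (words : List String) : Prop :=
  (words.all (fun w => w.toList.all (fun c => 97 ≤ c.toNat))) = true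
instance (words : List String) : Decidable (Pre_maximum_product_of_word_lengths words) := by
  unfold Pre_maximum_product_of_word_lengths; infer_instance
def pvWitness_maximum_product_of_word_lengths : List String := ["abcw", "baz", "foo", "bar"]
def Spec_maximum_product_of_word_lengths (words : List String) (out : Int) : Prop := out = maximum_product_of_word_lengths_alt words
instance (words : List String) (out : Int) : Decidable (Spec_maximum_product_of_word_lengths words out) := by unfold Spec_maximum_product_of_word_lengths; infer_instance

-- ===== CLAIM (what is proved, stated in full; the proofs are below) =====
def Claim_equal_maximum_product_of_word_lengths : Prop := ∀ (words : List String), Dom_maximum_product_of_word_lengths words → Pre_maximum_product_of_word_lengths words → Spec_maximum_product_of_word_lengths words (maximum_product_of_word_lengths words)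

-- ===== LEMMAS AND PROOFS =====

-- the (mask, length) view of a word / of a list of words
def wmask (w : String) : Int :=
  w.toList.foldl (fun m c => PySem.Int.bor m ((1 : Int) <<< ((c.toNat : Int) - 97))) 0
def wpair (w : String) : Int × Int := (wmask w, PySem.Str.len w)
def wpairs (ws : List String) : List (Int × Int) := ws.map wpair

-- candidate products contributed by a late entry p against the earlier entries prev
def candsStep (prev : List (Int × Int)) (p : Int × Int) : List Int :=
  prev.filterMap (fun q => if PySem.Int.band p.1 q.1 = 0 then some (p.2 * q.2) else none)
-- all candidate products of (earlier, later) pairs, in scan order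
def candsAux (prev : List (Int × Int)) : List (Int × Int) → List Int
  | [] => []
  | p :: rest => candsStep prev p ++ candsAux (prev ++ [p]) rest

theorem foldl_max_candsStep (prev : List (Int × Int)) (p : Int × Int) (a : Int) :
    prev.foldl (fun a q => if PySem.Int.band p.1 q.1 = 0 then max a (p.2 * q.2) else a) a
      = (candsStep prev p).foldl max a := by
  induction prev generalizing a with
  | nil => rfl
  | cons q rest ih =>
      simp only [candsStep, List.filterMap_cons, List.foldl_cons]
      split <;> simp [candsStep, ih]

theorem candsAux_snoc (l : List (Int × Int)) (prev : List (Int × Int)) (p : Int × Int) :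
    candsAux prev (l ++ [p]) = candsAux prev l ++ candsStep (prev ++ l) p := by
  induction l generalizing prev with
  | nil => simp [candsAux]
  | cons q rest ih => simp [candsAux, ih, List.append_assoc]

theorem mem_candsStep {prev : List (Int × Int)} {p : Int × Int} {v : Int} :
    v ∈ candsStep prev p ↔ ∃ q ∈ prev, PySem.Int.band p.1 q.1 = 0 ∧ v = p.2 * q.2 := by
  simp only [candsStep, List.mem_filterMap]
  constructor
  · rintro ⟨q, hq, h⟩
    split at h
    · exact ⟨q, hq, by assumption, by simpa using h.symm⟩
    · simp at h
  · rintro ⟨q, hq, hb, hv⟩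
    exact ⟨q, hq, by simp [hb, hv]⟩

theorem mem_candsAux {l prev : List (Int × Int)} {v : Int} :
    v ∈ candsAux prev l ↔ ∃ p q, PySem.Int.band p.1 q.1 = 0 ∧ v = p.2 * q.2 ∧
      ((q ∈ prev ∧ p ∈ l) ∨ [q, p].Sublist l) := by
  induction l generalizing prev with
  | nil => simp [candsAux]
  | cons p rest ih =>
      simp only [candsAux, List.mem_append, mem_candsStep, ih]
      constructor
      · rintro (⟨q, hq, hb, hv⟩ | ⟨p', q', hb, hv, h⟩)
        · exact ⟨p, q, hb, hv, Or.inl ⟨hq, List.mem_cons_self⟩⟩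
        · rcases h with ⟨hq', hp'⟩ | hsub
          · rcases hq' with hq' | hq'
            · exact ⟨p', q', hb, hv, Or.inl ⟨hq', List.mem_cons_of_mem _ hp'⟩⟩
            · have hq'' : q' = p := by simpa using hq'
              subst hq''
              exact ⟨p', q', hb, hv, Or.inr ((List.singleton_sublist.2 hp').cons₂ q')⟩
          · exact ⟨p', q', hb, hv, Or.inr (hsub.cons p)⟩
      · rintro ⟨p', q', hb, hv, h⟩
        rcases h with ⟨hq', hp'⟩ | hsub
        · rcases List.mem_cons.1 hp' with rfl | hp'
          · exact Or.inl ⟨q', hq', hb, hv⟩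
          · exact Or.inr ⟨p', q', hb, hv, Or.inl ⟨Or.inl hq', hp'⟩⟩
        · cases hsub with
          | cons _ hsub => exact Or.inr ⟨p', q', hb, hv, Or.inr hsub⟩
          | cons₂ _ hsub =>
              exact Or.inr ⟨p', p, hb, hv, Or.inl ⟨Or.inr (by simp),
                List.singleton_sublist.1 hsub⟩⟩

theorem strlen_nonneg (w : String) : 0 ≤ PySem.Str.len w := by
  rw [PySem.Str.len_eq]; exact Int.natCast_nonneg _

-- ----- A's port computes the fold of candsAux over the word pairs -----

theorem outerA (ws : List String) (k : Nat) (hk : k ≤ ws.length) :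
    (PySem.List.pyRange 0 (k : Int) 1).foldl (fun (st : Int × List Int) i =>
      let bi := (PySem.List.pyGetD ws i "").toList.foldl
          (fun b c => PySem.Int.bor b ((1 : Int) <<< ((c.toNat : Int) - 97)))
          (PySem.List.pyGetD st.2 i 0)
      let bits := PySem.List.pySetD st.2 i bi
      let ans := (PySem.List.pyRange 0 i 1).foldl (fun a j =>
          if PySem.Int.band bi (PySem.List.pyGetD bits j 0) = 0 then
            max a (PySem.Str.len (PySem.List.pyGetD ws i "") *
                   PySem.Str.len (PySem.List.pyGetD ws j ""))
          else a) st.1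
      (ans, bits)) ((0 : Int), List.replicate ws.length (0 : Int))
    = ((candsAux [] (wpairs (ws.take k))).foldl max 0,
       (wpairs (ws.take k)).map Prod.fst ++ List.replicate (ws.length - k) (0 : Int)) := by
  induction k with
  | zero => simp [wpairs, candsAux, PySem.List.pyRange_one_eq_nil]
  | succ k ih =>
      have hk' : k ≤ ws.length := by omega
      have hlen : k < ws.length := by omega
      have hcast : (((k + 1 : Nat)) : Int) = (k : Int) + 1 := by push_cast; ring
      rw [hcast, PySem.List.pyRange_one_succ_right (Int.natCast_nonneg k), List.foldl_append,
        ih hk', List.foldl_cons, List.foldl_nil]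
      dsimp only
      have hMlen : ((wpairs (ws.take k)).map Prod.fst).length = k := by
        simp [wpairs, min_eq_left hk']
      have hsplit : ws.length - k = (ws.length - (k + 1)) + 1 := by omega
      rw [hsplit, List.replicate_succ]
      have h1 : PySem.List.pyGetD ws ((k : Nat) : Int) "" = ws[k] := by
        rw [PySem.List.pyGetD_natCast, List.getD_eq_getElem ws "" hlen]
      have h2 : PySem.List.pyGetD ((wpairs (ws.take k)).map Prod.fst ++
          0 :: List.replicate (ws.length - (k + 1)) (0 : Int)) ((k : Nat) : Int) 0 = 0 := by
        rw [PySem.List.pyGetD_natCast, List.getD_append_right _ _ _ _ (by omega), hMlen]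
        simp
      rw [h1, h2]
      have hbi : ws[k].toList.foldl
          (fun b c => PySem.Int.bor b ((1 : Int) <<< ((c.toNat : Int) - 97))) 0 = wmask ws[k] := rfl
      rw [hbi]
      have h4 : PySem.List.pySetD ((wpairs (ws.take k)).map Prod.fst ++
            0 :: List.replicate (ws.length - (k + 1)) (0 : Int)) ((k : Nat) : Int) (wmask ws[k])
          = ((wpairs (ws.take k)).map Prod.fst ++ [wmask ws[k]]) ++
            List.replicate (ws.length - (k + 1)) (0 : Int) := by
        rw [PySem.List.pySetD_natCast, List.set_append]
        simp [hMlen]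
      rw [h4]
      have htake : wpairs (ws.take (k + 1)) = wpairs (ws.take k) ++ [wpair ws[k]] := by
        simp only [wpairs, List.take_add_one, List.getElem?_eq_getElem hlen, Option.toList_some,
          List.map_append, List.map_cons, List.map_nil]
      have h5 : (PySem.List.pyRange 0 ((k : Nat) : Int) 1).foldl (fun a j =>
            if PySem.Int.band (wmask ws[k]) (PySem.List.pyGetD
                (((wpairs (ws.take k)).map Prod.fst ++ [wmask ws[k]]) ++
                  List.replicate (ws.length - (k + 1)) (0 : Int)) j 0) = 0 then
              max a (PySem.Str.len ws[k] * PySem.Str.len (PySem.List.pyGetD ws j ""))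
            else a) ((candsAux [] (wpairs (ws.take k))).foldl max 0)
          = (candsStep (wpairs (ws.take k)) (wpair ws[k])).foldl max
              ((candsAux [] (wpairs (ws.take k))).foldl max 0) := by
        have hP : (wpairs (ws.take k)).length = k := by simp [wpairs, min_eq_left hk']
        rw [← foldl_max_candsStep (wpairs (ws.take k)) (wpair ws[k])
          ((candsAux [] (wpairs (ws.take k))).foldl max 0)]
        rw [show ((k : Nat) : Int) = (((wpairs (ws.take k)).length : Nat) : Int) from by rw [hP]]
        rw [← PySem.List.foldl_pyRange_zero_pyGetD' (wpairs (ws.take k)) ((0 : Int), (0 : Int))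
          (fun a q => if PySem.Int.band (wpair ws[k]).1 q.1 = 0 then
            max a ((wpair ws[k]).2 * q.2) else a)
          ((candsAux [] (wpairs (ws.take k))).foldl max 0)]
        refine PySem.List.foldl_congr_mem _ _ _ _ ?_
        intro acc j hj
        rcases PySem.List.mem_pyRange_one.1 hj with ⟨hj0, hjk⟩
        rw [hP] at hjk
        have hjk' : j.toNat < k := by omega
        have hjlen : j.toNat < ws.length := by omega
        have e1 : PySem.List.pyGetD (((wpairs (ws.take k)).map Prod.fst ++ [wmask ws[k]]) ++
              List.replicate (ws.length - (k + 1)) (0 : Int)) j 0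
            = (PySem.List.pyGetD (wpairs (ws.take k)) j ((0 : Int), (0 : Int))).1 := by
          rw [PySem.List.pyGetD_eq_getElem _ _ hj0 (by simp [hMlen]; omega),
            PySem.List.pyGetD_eq_getElem _ _ hj0 (by rw [hP]; exact_mod_cast hjk)]
          rw [List.getElem_append_left (by simp [hMlen]; omega),
            List.getElem_append_left (by rw [hMlen]; exact hjk')]
          simp
        have e2 : PySem.Str.len (PySem.List.pyGetD ws j "")
            = (PySem.List.pyGetD (wpairs (ws.take k)) j ((0 : Int), (0 : Int))).2 := by
          rw [PySem.List.pyGetD_eq_getElem ws "" hj0 (by omega),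
            PySem.List.pyGetD_eq_getElem _ _ hj0 (by rw [hP]; exact_mod_cast hjk)]
          simp [wpairs, wpair, List.getElem_take]
        rw [e1, e2]
        simp [wpair]
      rw [Prod.mk.injEq]
      refine ⟨?_, ?_⟩
      · rw [htake, candsAux_snoc, List.nil_append, List.foldl_append]
        exact h5
      · rw [htake]
        simp [wpair]

theorem A_eq_cands (ws : List String) :
    maximum_product_of_word_lengths ws = (candsAux [] (wpairs ws)).foldl max 0 := by
  simp only [maximum_product_of_word_lengths]
  rw [outerA ws ws.length (le_refl _)]
  simp

-- ----- permutation invariance of the max candidate product -----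

theorem perm_pair_cases {α : Type} {p q : α} {l : List α} (h : l.Perm [p, q]) :
    l = [p, q] ∨ l = [q, p] := by
  have hlen : l.length = 2 := by simpa using h.length_eq
  match l, hlen, h with
  | [a, b], _, h =>
      have hmem : a ∈ ([p, q] : List α) := h.mem_iff.1 (by simp)
      rcases (by simpa using hmem : a = p ∨ a = q) with rfl | rfl
      · have hb : b = q := by
          have := (List.perm_cons a).1 h
          simpa [List.perm_singleton] using this
        exact Or.inl (by rw [hb])
      · have h' : ([a, b] : List α).Perm [a, p] := h.trans (List.Perm.swap a p [])
        have hb : b = p := by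
          have := (List.perm_cons a).1 h'
          simpa [List.perm_singleton] using this
        exact Or.inr (by rw [hb])

theorem pair_sublist_perm {α : Type} {p q : α} {l l' : List α} (hp : l.Perm l')
    (hs : [q, p].Sublist l) : [q, p].Sublist l' ∨ [p, q].Sublist l' := by
  have h1 : ([q, p] : List α).Subperm l' := hs.subperm.trans hp.subperm
  rcases h1 with ⟨m, hm, hms⟩
  rcases perm_pair_cases hm with rfl | rfl
  · exact Or.inl hms
  · exact Or.inr hms

theorem cands_max_le_of_perm (l l' : List (Int × Int)) (hp : l.Perm l') :
    (candsAux [] l).foldl max 0 ≤ (candsAux [] l').foldl max 0 := by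
  rcases PySem.List.foldl_max_mem (candsAux [] l) 0 with h | h
  · rw [h]; exact (PySem.List.le_foldl_max _ _).1
  · rcases mem_candsAux.1 h with ⟨p, q, hb, hv, hc⟩
    rcases hc with ⟨hq, _⟩ | hsub
    · cases hq
    · rcases pair_sublist_perm hp hsub with hs | hs
      · exact (PySem.List.le_foldl_max _ _).2 _
          (mem_candsAux.2 ⟨p, q, hb, hv, Or.inr hs⟩)
      · exact (PySem.List.le_foldl_max _ _).2 _
          (mem_candsAux.2 ⟨q, p, by rw [PySem.Int.band_comm]; exact hb,
            by rw [hv]; ring, Or.inr hs⟩)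

theorem cands_max_perm (l l' : List (Int × Int)) (hp : l.Perm l') :
    (candsAux [] l).foldl max 0 = (candsAux [] l').foldl max 0 :=
  le_antisymm (cands_max_le_of_perm l l' hp) (cands_max_le_of_perm l' l hp.symm)

-- ----- the greedy sorted scan of B computes the same max -----

theorem innerB_ge (m l : Int) (t : List (Int × Int)) (a : Int) : a ≤ innerB m l t a := by
  induction t with
  | nil => exact le_refl a
  | cons x rest ih =>
      by_cases h1 : l * x.2 ≤ a
      · simp [innerB, h1]
      · by_cases h2 : PySem.Int.band m x.1 = 0
        · simp [innerB, h1, h2]; omega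
        · simpa [innerB, h1, h2] using ih

theorem innerB_mem (m l : Int) (t : List (Int × Int)) (a : Int) :
    innerB m l t a = a ∨ ∃ x ∈ t, PySem.Int.band m x.1 = 0 ∧ innerB m l t a = l * x.2 := by
  induction t with
  | nil => exact Or.inl rfl
  | cons x rest ih =>
      by_cases h1 : l * x.2 ≤ a
      · simp [innerB, h1]
      · by_cases h2 : PySem.Int.band m x.1 = 0
        · exact Or.inr ⟨x, List.mem_cons_self, h2, by simp [innerB, h1, h2]⟩
        · rcases ih with h | ⟨y, hy, hby, hval⟩
          · exact Or.inl (by simpa [innerB, h1, h2] using h)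
          · exact Or.inr ⟨y, List.mem_cons_of_mem _ hy, hby, by simpa [innerB, h1, h2] using hval⟩

theorem innerB_ub (m l : Int) (hl : 0 ≤ l) (t : List (Int × Int)) (a : Int)
    (hd : t.Pairwise (fun a b => b.2 ≤ a.2)) :
    ∀ x ∈ t, PySem.Int.band m x.1 = 0 → l * x.2 ≤ innerB m l t a := by
  induction t generalizing a with
  | nil => intro x hx; cases hx
  | cons y rest ih =>
      rcases List.pairwise_cons.1 hd with ⟨hy, hrest⟩
      intro x hx hbx
      have hx2 : x.2 ≤ y.2 := by
        rcases List.mem_cons.1 hx with rfl | hx'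
        · exact le_refl _
        · exact hy x hx'
      have hmul : l * x.2 ≤ l * y.2 := mul_le_mul_of_nonneg_left hx2 hl
      by_cases h1 : l * y.2 ≤ a
      · simp only [innerB, h1, if_true]; omega
      · by_cases h2 : PySem.Int.band m y.1 = 0
        · simp only [innerB, h1, if_false, h2, if_true]; exact hmul
        · simp only [innerB, h1, if_false, h2]
          rcases List.mem_cons.1 hx with rfl | hx'
          · exact absurd hbx h2
          · exact ih a hrest x hx' hbx

theorem outerB_ge (t : List (Int × Int)) (a : Int) : a ≤ outerB t a := by
  induction t generalizing a with
  | nil => exact le_refl a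
  | cons x rest ih =>
      by_cases h1 : x.2 * x.2 ≤ a
      · simp [outerB, h1]
      · simp only [outerB, h1, if_false]
        exact le_trans (innerB_ge x.1 x.2 rest a) (ih _)

theorem outerB_mem (t : List (Int × Int)) (a : Int) :
    outerB t a = a ∨ outerB t a ∈ candsAux [] t := by
  induction t generalizing a with
  | nil => exact Or.inl rfl
  | cons h rest ih =>
      by_cases h1 : h.2 * h.2 ≤ a
      · simp [outerB, h1]
      · have hstep : outerB (h :: rest) a = outerB rest (innerB h.1 h.2 rest a) := by
          simp [outerB, h1]
        rw [hstep]
        rcases ih (innerB h.1 h.2 rest a) with heq | hmem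
        · rw [heq]
          rcases innerB_mem h.1 h.2 rest a with heq' | ⟨x, hx, hbx, hval⟩
          · exact Or.inl heq'
          · refine Or.inr (mem_candsAux.2 ⟨x, h, ?_, ?_, Or.inr ?_⟩)
            · rw [PySem.Int.band_comm]; exact hbx
            · rw [hval]; ring
            · exact (List.singleton_sublist.2 hx).cons₂ h
        · rcases mem_candsAux.1 hmem with ⟨p, q, hb, hv, hc⟩
          rcases hc with ⟨hq, _⟩ | hsub
          · cases hq
          · exact Or.inr (mem_candsAux.2 ⟨p, q, hb, hv, Or.inr (hsub.cons h)⟩)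

theorem outerB_ub (t : List (Int × Int)) (a : Int)
    (hd : t.Pairwise (fun a b => b.2 ≤ a.2)) (hnn : ∀ x ∈ t, 0 ≤ x.2) (ha : 0 ≤ a) :
    ∀ v ∈ candsAux [] t, v ≤ outerB t a := by
  induction t generalizing a with
  | nil => intro v hv; cases hv
  | cons h rest ih =>
      rcases List.pairwise_cons.1 hd with ⟨hh, hrest⟩
      intro v hv
      rcases mem_candsAux.1 hv with ⟨p, q, hb, hveq, hc⟩
      rcases hc with ⟨hq, _⟩ | hsub
      · cases hq
      · by_cases h1 : h.2 * h.2 ≤ a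
        · simp only [outerB, h1, if_true]
          have hple : p.2 ≤ h.2 := by
            rcases List.mem_cons.1 (hsub.subset (by simp : p ∈ [q, p])) with rfl | hp'
            · exact le_refl _
            · exact hh p hp'
          have hqle : q.2 ≤ h.2 := by
            rcases List.mem_cons.1 (hsub.subset (by simp : q ∈ [q, p])) with rfl | hq'
            · exact le_refl _
            · exact hh q hq'
          have hqnn : 0 ≤ q.2 := hnn q (hsub.subset (by simp))
          have hhnn : 0 ≤ h.2 := hnn h List.mem_cons_self
          calc v = p.2 * q.2 := hveq
            _ ≤ h.2 * h.2 := mul_le_mul hple hqle hqnn hhnn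
            _ ≤ a := h1
        · simp only [outerB, h1, if_false]
          have hb' : 0 ≤ innerB h.1 h.2 rest a := le_trans ha (innerB_ge _ _ _ _)
          cases hsub with
          | cons _ hsub' =>
              exact ih (innerB h.1 h.2 rest a) hrest
                (fun x hx => hnn x (List.mem_cons_of_mem _ hx)) hb' v
                (mem_candsAux.2 ⟨p, q, hb, hveq, Or.inr hsub'⟩)
          | cons₂ _ hsub' =>
              have hp : p ∈ rest := List.singleton_sublist.1 hsub'
              have hbhp : PySem.Int.band h.1 p.1 = 0 := by
                rw [PySem.Int.band_comm]; exact hb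
              have hlead : h.2 * p.2 ≤ innerB h.1 h.2 rest a :=
                innerB_ub h.1 h.2 (hnn h List.mem_cons_self) rest a hrest p hp hbhp
              have hveq' : v = h.2 * p.2 := by rw [hveq]; ring
              rw [hveq']
              exact le_trans hlead (outerB_ge rest _)

theorem B_eq_cands (ws : List String) :
    maximum_product_of_word_lengths_alt ws = (candsAux [] (wpairs ws)).foldl max 0 := by
  have hpairs : ws.foldl (fun (acc : List (Int × Int)) w =>
      acc ++ [(w.toList.foldl (fun m c => PySem.Int.bor m ((1 : Int) <<< ((c.toNat : Int) - 97))) 0,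
               PySem.Str.len w)]) [] = wpairs ws := by
    rw [PySem.List.foldl_append_singleton_eq_map]
    rfl
  show outerB (PySem.List.sorted _ (fun p => p.2) true) 0 = _
  rw [hpairs]
  have hperm : (PySem.List.sorted (wpairs ws) (fun p => p.2) true).Perm (wpairs ws) :=
    PySem.List.sorted_perm _ _ _
  have hd : (PySem.List.sorted (wpairs ws) (fun p => p.2) true).Pairwise
      (fun a b => b.2 ≤ a.2) := PySem.List.sorted_pairwise_rev _ _
  have hnn : ∀ x ∈ PySem.List.sorted (wpairs ws) (fun p => p.2) true, 0 ≤ x.2 := by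
    intro x hx
    rcases List.mem_map.1 (hperm.mem_iff.1 hx) with ⟨w, _, rfl⟩
    exact strlen_nonneg w
  have hmain : outerB (PySem.List.sorted (wpairs ws) (fun p => p.2) true) 0
      = (candsAux [] (PySem.List.sorted (wpairs ws) (fun p => p.2) true)).foldl max 0 := by
    apply le_antisymm
    · rcases outerB_mem (PySem.List.sorted (wpairs ws) (fun p => p.2) true) 0 with h | h
      · rw [h]; exact (PySem.List.le_foldl_max _ _).1
      · exact (PySem.List.le_foldl_max _ _).2 _ h
    · rcases PySem.List.foldl_max_mem
          (candsAux [] (PySem.List.sorted (wpairs ws) (fun p => p.2) true)) 0 with h | h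
      · rw [h]; exact outerB_ge _ _
      · exact outerB_ub _ 0 hd hnn (le_refl 0) _ h
  rw [hmain]
  exact cands_max_perm _ _ hperm

-- ===== VERDICT (by name: the statement is the Claim_ definition above) =====
theorem maximum_product_of_word_lengths_spec : Claim_equal_maximum_product_of_word_lengths := by
  intro words _ _
  unfold Spec_maximum_product_of_word_lengths
  rw [A_eq_cands, B_eq_cands]
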